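-- pv_equiv track=rewrite | github.com/siju-s/JobAutoMate | backend/service.py | get_status_for_job
-- ===== SOURCE A (Python) =====
-- def get_status_for_job(text, rejection_status):
--     if rejection_status == 'Rejected': return 'REJECTED'  # early exit
--     offer_keywords = {'offer'}  # need to decide if this can have negative conotation
--     test_keywords = {'oa', 'assessment', 'hackerrank', 'codesignal'}
--     interview = {'zoom', 'interview', 'phone-screen', 'phonescreen'}
--
--     is_oa_round = False
--     is_interview_round = False
--     is_offer = False
--
--
--     for word in text.split(' '):
--         if word in test_keywords:
--             is_oa_round = True
--         if word in interview:
--             is_interview_round = True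
--         if word in offer_keywords:
--             is_offer = True
--
--     if is_oa_round:
--         return "OA"
--     elif is_interview_round:
--         return "INTERVIEW"
--     elif is_offer:
--         return "OFFER"
--     else:
--         return "APPLIED"
-- ===== SOURCE B (Python) =====
-- PRIORITY = [
--     ({'oa', 'assessment', 'hackerrank', 'codesignal'}, 'OA'),
--     ({'zoom', 'interview', 'phone-screen', 'phonescreen'}, 'INTERVIEW'),
--     ({'offer'}, 'OFFER'),
-- ]
--
--
-- def get_status_for_job(text, rejection_status):
--     if rejection_status == 'Rejected':
--         return 'REJECTED'
--     words = set(text.split(' '))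
--     for keywords, status in PRIORITY:
--         if keywords & words:
--             return status
--     return 'APPLIED'
-- ===== Notes on version B (the rewrite author's own statement) =====
-- stated objective: simpler
-- what changed: Instead of scanning every word and accumulating three boolean flags resolved by an if/elif chain, B builds the set of words once and then walks a priority table of (keyword-set, status) pairs, returning the first status whose keyword set intersects the word set.
import Mathlib
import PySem

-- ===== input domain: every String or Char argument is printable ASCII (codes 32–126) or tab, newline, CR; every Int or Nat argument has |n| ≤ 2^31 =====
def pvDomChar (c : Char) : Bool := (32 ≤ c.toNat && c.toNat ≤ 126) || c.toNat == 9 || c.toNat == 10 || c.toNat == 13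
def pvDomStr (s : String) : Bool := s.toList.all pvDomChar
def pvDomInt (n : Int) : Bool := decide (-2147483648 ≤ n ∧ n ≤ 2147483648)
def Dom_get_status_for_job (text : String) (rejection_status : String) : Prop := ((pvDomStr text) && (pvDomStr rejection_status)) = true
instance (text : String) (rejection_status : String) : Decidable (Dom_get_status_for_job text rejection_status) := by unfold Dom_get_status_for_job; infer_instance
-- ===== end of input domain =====

-- B replaces A's per-word boolean-flag accumulation and if/elif chain by building the
-- word set once and walking a priority table of (keyword-set, status) pairs, returning
-- the first status whose keywords intersect the words (objective: simpler).


-- ===== PORT A =====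
def get_status_for_job (text : String) (rejection_status : String) : String :=
  if rejection_status == "Rejected" then "REJECTED"
  else
    let offer_keywords : PySem.Set (List Char) := PySem.Set.ofList ["offer".toList]
    let test_keywords : PySem.Set (List Char) :=
      PySem.Set.ofList ["oa".toList, "assessment".toList, "hackerrank".toList, "codesignal".toList]
    let interview : PySem.Set (List Char) :=
      PySem.Set.ofList ["zoom".toList, "interview".toList, "phone-screen".toList, "phonescreen".toList]
    let st := (PySem.Chars.splitOn text.toList " ".toList).foldl
      (fun (st : Bool × Bool × Bool) word =>
        let st := if PySem.Set.contains test_keywords word then (true, st.2.1, st.2.2) else st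
        let st := if PySem.Set.contains interview word then (st.1, true, st.2.2) else st
        if PySem.Set.contains offer_keywords word then (st.1, st.2.1, true) else st)
      (false, false, false)
    if st.1 then "OA"
    else if st.2.1 then "INTERVIEW"
    else if st.2.2 then "OFFER"
    else "APPLIED"

-- ===== PORT B =====
def pvPriority : List (PySem.Set (List Char) × String) :=
  [(PySem.Set.ofList ["oa".toList, "assessment".toList, "hackerrank".toList, "codesignal".toList], "OA"),
   (PySem.Set.ofList ["zoom".toList, "interview".toList, "phone-screen".toList, "phonescreen".toList], "INTERVIEW"),
   (PySem.Set.ofList ["offer".toList], "OFFER")]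

-- the 'for keywords, status in PRIORITY' loop: first entry whose intersection with words is nonempty
def pvFirstMatch (table : List (PySem.Set (List Char) × String)) (words : PySem.Set (List Char)) : String :=
  match table with
  | [] => "APPLIED"
  | (keywords, status) :: rest =>
      if (PySem.Set.inter keywords words).isEmpty then pvFirstMatch rest words else status

def get_status_for_job_alt (text : String) (rejection_status : String) : String :=
  if rejection_status == "Rejected" then "REJECTED"
  else
    let words : PySem.Set (List Char) := PySem.Set.ofList (PySem.Chars.splitOn text.toList " ".toList)
    pvFirstMatch pvPriority words

-- ===== PRECONDITION & SPEC =====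
def Spec_get_status_for_job (text : String) (rejection_status : String) (out : String) : Prop := out = get_status_for_job_alt text rejection_status
instance (text : String) (rejection_status : String) (out : String) : Decidable (Spec_get_status_for_job text rejection_status out) := by unfold Spec_get_status_for_job; infer_instance

-- ===== CLAIM (what is proved, stated in full; the proofs are below) =====
def Claim_equal_get_status_for_job : Prop := ∀ (text : String) (rejection_status : String), Dom_get_status_for_job text rejection_status → Spec_get_status_for_job text rejection_status (get_status_for_job text rejection_status)

-- ===== LEMMAS AND PROOFS =====

-- A's flag fold just ORs, per component, the membership of each word in that flag's keyword set
theorem pvFoldA_eq (T I O : PySem.Set (List Char)) (ws : List (List Char)) (a b c : Bool) :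
    ws.foldl
      (fun (st : Bool × Bool × Bool) word =>
        let st := if PySem.Set.contains T word then (true, st.2.1, st.2.2) else st
        let st := if PySem.Set.contains I word then (st.1, true, st.2.2) else st
        if PySem.Set.contains O word then (st.1, st.2.1, true) else st)
      (a, b, c)
    = (a || ws.any (fun w => PySem.Set.contains T w),
       b || ws.any (fun w => PySem.Set.contains I w),
       c || ws.any (fun w => PySem.Set.contains O w)) := by
  induction ws generalizing a b c with
  | nil => simp
  | cons w ws ih =>
    simp at ih
    cases a <;> cases b <;> cases c <;>
    cases hT : PySem.Set.contains T w <;>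
    cases hI : PySem.Set.contains I w <;>
    cases hO : PySem.Set.contains O w <;>
      simp only [PySem.Set.contains_eq_listContains, List.contains_eq_mem,
        decide_eq_true_eq, decide_eq_false_iff_not] at hT hI hO <;>
      simp [List.foldl_cons, List.any_cons, hT, hI, hO, ih]

-- the intersection with the word set is empty iff no word is in the keyword set
theorem pvInter_isEmpty (kw ws : List (List Char)) :
    (PySem.Set.inter (PySem.Set.ofList kw) (PySem.Set.ofList ws)).isEmpty
      = !ws.any (fun w => PySem.Set.contains (PySem.Set.ofList kw) w) := by
  rw [Bool.eq_iff_iff]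
  simp only [List.isEmpty_iff, List.eq_nil_iff_forall_not_mem, PySem.Set.mem_inter,
    PySem.Set.mem_ofList, Bool.not_eq_eq_eq_not, Bool.not_true, List.any_eq_false,
    PySem.Set.contains_eq_listContains, List.contains_eq_mem, decide_eq_true_eq]
  constructor
  · intro h w hw hmem; exact h w ⟨hmem, hw⟩
  · rintro h w ⟨hkw, hws⟩; exact h w hws hkw

-- ===== VERDICT (by name: the statement is the Claim_ definition above) =====
theorem get_status_for_job_spec : Claim_equal_get_status_for_job := by
  intro text rejection_status _
  unfold Spec_get_status_for_job
  simp only [get_status_for_job, get_status_for_job_alt]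
  by_cases hr : rejection_status == "Rejected"
  · simp [hr]
  · simp only [hr, Bool.false_eq_true, if_false]
    rw [pvFoldA_eq]
    simp only [Bool.false_or, pvFirstMatch, pvPriority, pvInter_isEmpty]
    set ws := PySem.Chars.splitOn text.toList " ".toList
    cases hT : ws.any (fun w => PySem.Set.contains (PySem.Set.ofList ["oa".toList, "assessment".toList, "hackerrank".toList, "codesignal".toList]) w) <;>
    cases hI : ws.any (fun w => PySem.Set.contains (PySem.Set.ofList ["zoom".toList, "interview".toList, "phone-screen".toList, "phonescreen".toList]) w) <;>
    cases hO : ws.any (fun w => PySem.Set.contains (PySem.Set.ofList ["offer".toList]) w) <;>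
      simp
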